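-- pv_equiv track=rewrite | github.com/Flapjacck/CP104 | Kell6733_l08/src/functions.py | list_categorize
-- ===== SOURCE A (Python) =====
-- def list_categorize(values):
--     """
--     -------------------------------------------------------
--     Returns data about the categories of values in a list.
--     Use: negatives, positives, zeroes, evens, odds = list_categorize(values)
--     -------------------------------------------------------
--     Parameters:
--         values - a list of values (list of int)
--     Returns:
--         negatives - the number of negative values (int)
--         positives - the number of positive values (int)
--         zeroes - the number of zeroes (int)
--         evens - the number of even values (int)
--         odds - the number of odd values (int)
--     -------------------------------------------------------
--     """
--     negatives = 0
--     positives = 0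
--     zeroes = 0
--     evens = 0
--     odds = 0
--     for i in values:
--         if i > 0:
--             positives += 1
--         elif i < 0:
--             negatives += 1
--         else:
--             zeroes += 1
--         if i % 2 == 0:
--             evens += 1
--         else:
--             odds += 1
--     return negatives, positives, zeroes, evens, odds
-- ===== SOURCE B (Python) =====
-- def list_categorize(values):
--     negatives = sum(1 for x in values if x < 0)
--     positives = sum(1 for x in values if x > 0)
--     zeroes = sum(1 for x in values if x == 0)
--     evens = sum(1 for x in values if x % 2 == 0)
--     odds = sum(1 for x in values if x % 2 != 0)
--     return negatives, positives, zeroes, evens, odds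
-- ===== Notes on version B (the rewrite author's own statement) =====
-- stated objective: alternative
-- what changed: Replaces the single fused loop with shared mutable counters by five independent one-condition passes (count of x<0, x>0, x==0, x%2==0, x%2!=0).
import Mathlib
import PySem

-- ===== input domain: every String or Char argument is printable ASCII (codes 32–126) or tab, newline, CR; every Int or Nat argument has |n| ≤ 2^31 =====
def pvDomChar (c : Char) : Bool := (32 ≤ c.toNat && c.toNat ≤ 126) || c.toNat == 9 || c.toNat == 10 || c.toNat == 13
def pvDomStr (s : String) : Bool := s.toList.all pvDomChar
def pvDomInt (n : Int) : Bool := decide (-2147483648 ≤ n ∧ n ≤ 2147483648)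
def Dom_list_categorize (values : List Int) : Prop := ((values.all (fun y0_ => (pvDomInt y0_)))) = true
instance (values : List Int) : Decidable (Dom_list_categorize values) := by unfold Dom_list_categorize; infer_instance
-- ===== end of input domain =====

-- B replaces A's single fused loop over shared counters by five independent single-condition counts (alternative decomposition, same O(n) cost).

-- ===== PORT A =====
-- A: one loop threading five mutable counters.
def list_categorize (values : List Int) : Int × Int × Int × Int × Int :=
  let s := values.foldl
    (fun (s : Int × Int × Int × Int × Int) i =>
      let (negatives, positives, zeroes, evens, odds) := s
      let (negatives, positives, zeroes) :=
        if i > 0 then (negatives, positives + 1, zeroes)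
        else if i < 0 then (negatives + 1, positives, zeroes)
        else (negatives, positives, zeroes + 1)
      let (evens, odds) :=
        if PySem.Int.mod i 2 = 0 then (evens + 1, odds) else (evens, odds + 1)
      (negatives, positives, zeroes, evens, odds))
    (0, 0, 0, 0, 0)
  s

-- ===== PORT B =====
-- B: five independent passes, one per condition (sum(1 for x in values if cond) = countP).
def list_categorize_alt (values : List Int) : Int × Int × Int × Int × Int :=
  ((values.countP (fun x => x < 0) : Int),
   (values.countP (fun x => x > 0) : Int),
   (values.countP (fun x => x == 0) : Int),
   (values.countP (fun x => PySem.Int.mod x 2 == 0) : Int),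
   (values.countP (fun x => PySem.Int.mod x 2 != 0) : Int))

-- ===== PRECONDITION & SPEC =====
def Spec_list_categorize (values : List Int) (out : Int × Int × Int × Int × Int) : Prop := out = list_categorize_alt values
instance (values : List Int) (out : Int × Int × Int × Int × Int) : Decidable (Spec_list_categorize values out) := by unfold Spec_list_categorize; infer_instance

-- ===== CLAIM =====
def Claim_equal_list_categorize : Prop := ∀ (values : List Int), Dom_list_categorize values → Spec_list_categorize values (list_categorize values)

-- ===== LEMMAS AND PROOFS =====
theorem list_categorize_fold (values : List Int) (a b c d e : Int) :
    values.foldl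
      (fun (s : Int × Int × Int × Int × Int) i =>
        let (negatives, positives, zeroes, evens, odds) := s
        let (negatives, positives, zeroes) :=
          if i > 0 then (negatives, positives + 1, zeroes)
          else if i < 0 then (negatives + 1, positives, zeroes)
          else (negatives, positives, zeroes + 1)
        let (evens, odds) :=
          if PySem.Int.mod i 2 = 0 then (evens + 1, odds) else (evens, odds + 1)
        (negatives, positives, zeroes, evens, odds))
      (a, b, c, d, e) =
    (a + (values.countP (fun x => x < 0) : Int),
     b + (values.countP (fun x => x > 0) : Int),
     c + (values.countP (fun x => x == 0) : Int),
     d + (values.countP (fun x => PySem.Int.mod x 2 == 0) : Int),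
     e + (values.countP (fun x => PySem.Int.mod x 2 != 0) : Int)) := by
  induction values generalizing a b c d e with
  | nil => simp
  | cons x xs ih =>
    simp only [List.foldl_cons, List.countP_cons]
    rw [ih]
    simp only [PySem.Int.mod_eq_emod_of_pos (by norm_num : (0:Int) < 2)]
    by_cases h1 : x > 0 <;> by_cases h2 : x < 0 <;> by_cases h3 : x % 2 = 0 <;>
      simp [h1, h2, h3, Prod.ext_iff] <;> omega

-- ===== VERDICT =====
theorem list_categorize_spec : Claim_equal_list_categorize := by
  intro values _
  show list_categorize values = list_categorize_alt values
  simp only [list_categorize, list_categorize_alt, list_categorize_fold, zero_add]
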